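-- pv_equiv track=rewrite | github.com/JelleManders/DottedIntervalGraphs | histogram.py | get_complete_hist_data
-- ===== SOURCE A (Python) =====
-- def get_complete_hist_data(DIGs, NXs_empty, NXs_full):
-- 	max_key = 0
-- 	min_key = 100000
-- 	for hist in [DIGs, NXs_empty, NXs_full]:
-- 		for key in hist:
-- 			if key > max_key: max_key = key
-- 			if key < min_key: min_key = key
--
-- 	complete_hist_data = {"DIG":{},"NX_e":{}, "NX_f":{}}
-- 	for key in range(min_key, max_key+1):
-- 		complete_hist_data["DIG"][key] = DIGs[key] if key in DIGs else 0
-- 		complete_hist_data["NX_e"][key] = NXs_empty[key] if key in NXs_empty else 0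
-- 		complete_hist_data["NX_f"][key] = NXs_full[key] if key in NXs_full else 0
-- 	return complete_hist_data
-- ===== SOURCE B (Python) =====
-- def get_complete_hist_data(DIGs, NXs_empty, NXs_full):
-- 	all_keys = [*DIGs, *NXs_empty, *NXs_full]
-- 	max_key = max([0, *all_keys])
-- 	min_key = min([100000, *all_keys])
--
-- 	def dense(src):
-- 		it = iter(sorted(src.items(), key=lambda kv: kv[0]))
-- 		nxt = next(it, None)
-- 		out = {}
-- 		for k in range(min_key, max_key + 1):
-- 			if nxt is not None and nxt[0] == k:
-- 				out[k] = nxt[1]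
-- 				nxt = next(it, None)
-- 			else:
-- 				out[k] = 0
-- 		return out
--
-- 	return {"DIG": dense(DIGs), "NX_e": dense(NXs_empty), "NX_f": dense(NXs_full)}
-- ===== Notes on version B (the rewrite author's own statement) =====
-- stated objective: alternative
-- what changed: B computes the seeded bounds with the max/min builtins, then builds each dense table by a sort-then-merge sweep: it sorts each source histogram's items by key once and walks the key range with a pointer into that sorted list, emitting the head value on a key match and 0 otherwise, instead of A's per-range-key membership test and dict lookup into every source.
import Mathlib
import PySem

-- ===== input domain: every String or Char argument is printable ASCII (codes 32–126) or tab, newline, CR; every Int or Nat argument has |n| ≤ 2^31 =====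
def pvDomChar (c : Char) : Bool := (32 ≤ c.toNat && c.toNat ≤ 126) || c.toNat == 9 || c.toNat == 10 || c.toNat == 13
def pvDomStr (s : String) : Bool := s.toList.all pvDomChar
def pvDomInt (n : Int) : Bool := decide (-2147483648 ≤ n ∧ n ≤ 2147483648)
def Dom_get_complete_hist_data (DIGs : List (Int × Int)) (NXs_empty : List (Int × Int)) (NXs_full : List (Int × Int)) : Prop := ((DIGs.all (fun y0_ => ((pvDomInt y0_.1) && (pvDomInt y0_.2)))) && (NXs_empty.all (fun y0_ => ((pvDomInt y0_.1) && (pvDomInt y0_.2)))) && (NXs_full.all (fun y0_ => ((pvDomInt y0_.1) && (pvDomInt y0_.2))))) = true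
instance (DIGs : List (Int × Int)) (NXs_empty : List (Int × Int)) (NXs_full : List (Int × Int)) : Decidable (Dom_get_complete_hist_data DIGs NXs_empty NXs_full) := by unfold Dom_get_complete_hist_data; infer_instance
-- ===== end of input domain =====

-- B sorts each source's items by key once and sweeps the key range with a pointer into the
-- sorted list (merge), instead of A's per-range-key membership test and lookup; alternative algorithm, same results.


-- ===== PORT A =====
-- A-side helpers: the two loop bodies of A, named so the port stays readable.
-- body of "for key in hist: if key > max_key ...; if key < min_key ..." on the state (max_key, min_key)
def pvMinMaxStep (mm : Int × Int) (kv : Int × Int) : Int × Int :=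
  let mm1 := if kv.1 > mm.1 then (kv.1, mm.2) else mm
  if kv.1 < mm1.2 then (mm1.1, kv.1) else mm1

-- body of "for key in range(min_key, max_key+1):" — three guarded lookups, three inserts
def pvRowStep (dD dE dF : PySem.Dict Int Int)
    (st : PySem.Dict Int Int × PySem.Dict Int Int × PySem.Dict Int Int) (key : Int) :
    PySem.Dict Int Int × PySem.Dict Int Int × PySem.Dict Int Int :=
  (st.1.insert key (if dD.contains key then dD.getD key 0 else 0),
   st.2.1.insert key (if dE.contains key then dE.getD key 0 else 0),
   st.2.2.insert key (if dF.contains key then dF.getD key 0 else 0))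

def get_complete_hist_data (DIGs : List (Int × Int)) (NXs_empty : List (Int × Int)) (NXs_full : List (Int × Int)) : List (String × List (Int × Int)) :=
  -- max_key = 0; min_key = 100000; for hist in [...]: for key in hist: ...
  let mm : Int × Int := [DIGs, NXs_empty, NXs_full].foldl
    (fun mm hist => hist.foldl pvMinMaxStep mm) (0, 100000)
  let st := (PySem.List.pyRange mm.2 (mm.1 + 1) 1).foldl
    (pvRowStep (PySem.Dict.mk DIGs) (PySem.Dict.mk NXs_empty) (PySem.Dict.mk NXs_full))
    (PySem.Dict.empty, PySem.Dict.empty, PySem.Dict.empty)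
  [("DIG", st.1.items), ("NX_e", st.2.1.items), ("NX_f", st.2.2.items)]

-- ===== PORT B =====
-- body of B's range loop over the iterator state (nxt+it = the unconsumed sorted pairs):
-- "if nxt is not None and nxt[0] == k: out[k] = nxt[1]; nxt = next(it, None) else: out[k] = 0"
def pvMergeStep (st : List (Int × Int) × PySem.Dict Int Int) (k : Int) :
    List (Int × Int) × PySem.Dict Int Int :=
  match st.1 with
  | p :: rest => if p.1 == k then (rest, st.2.insert k p.2) else (st.1, st.2.insert k 0)
  | [] => (st.1, st.2.insert k 0)

-- def dense(src): it = iter(sorted(src.items(), key=lambda kv: kv[0])); nxt = next(it, None); out = {}; ...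
def pvDense (src : List (Int × Int)) (min_key max_key : Int) : PySem.Dict Int Int :=
  ((PySem.List.pyRange min_key (max_key + 1) 1).foldl pvMergeStep
    (PySem.List.sorted (PySem.Dict.mk src).items (fun kv => kv.1) false, PySem.Dict.empty)).2

def get_complete_hist_data_alt (DIGs : List (Int × Int)) (NXs_empty : List (Int × Int)) (NXs_full : List (Int × Int)) : List (String × List (Int × Int)) :=
  let all_keys := (DIGs ++ NXs_empty ++ NXs_full).map (·.1)
  let max_key := (PySem.List.max? ((0 : Int) :: all_keys) (fun y => y)).getD 0
  let min_key := (PySem.List.min? ((100000 : Int) :: all_keys) (fun y => y)).getD 100000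
  [("DIG", (pvDense DIGs min_key max_key).items),
   ("NX_e", (pvDense NXs_empty min_key max_key).items),
   ("NX_f", (pvDense NXs_full min_key max_key).items)]

-- ===== PRECONDITION & SPEC =====
-- Pre_ is purely an artefact of the assoc-list encoding of Python dicts: a Python dict cannot
-- carry duplicate keys, so Pre_ excludes no actual Python input; it requires each argument
-- list to have pairwise-distinct keys, as every dict-valued argument does.
def Pre_get_complete_hist_data (DIGs : List (Int × Int)) (NXs_empty : List (Int × Int)) (NXs_full : List (Int × Int)) : Prop :=
  (DIGs.map Prod.fst).Nodup ∧ (NXs_empty.map Prod.fst).Nodup ∧ (NXs_full.map Prod.fst).Nodup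
instance (DIGs : List (Int × Int)) (NXs_empty : List (Int × Int)) (NXs_full : List (Int × Int)) : Decidable (Pre_get_complete_hist_data DIGs NXs_empty NXs_full) := by unfold Pre_get_complete_hist_data; infer_instance
def pvWitness_get_complete_hist_data : (List (Int × Int)) × (List (Int × Int)) × (List (Int × Int)) := ([(1, 2)], [], [(0, 5)])
def Spec_get_complete_hist_data (DIGs : List (Int × Int)) (NXs_empty : List (Int × Int)) (NXs_full : List (Int × Int)) (out : List (String × List (Int × Int))) : Prop := out = get_complete_hist_data_alt DIGs NXs_empty NXs_full
instance (DIGs : List (Int × Int)) (NXs_empty : List (Int × Int)) (NXs_full : List (Int × Int)) (out : List (String × List (Int × Int))) : Decidable (Spec_get_complete_hist_data DIGs NXs_empty NXs_full out) := by unfold Spec_get_complete_hist_data; infer_instance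

-- ===== CLAIM (what is proved, stated in full; the proofs are below) =====
def Claim_equal_get_complete_hist_data : Prop := ∀ (DIGs : List (Int × Int)) (NXs_empty : List (Int × Int)) (NXs_full : List (Int × Int)), Dom_get_complete_hist_data DIGs NXs_empty NXs_full → Pre_get_complete_hist_data DIGs NXs_empty NXs_full → Spec_get_complete_hist_data DIGs NXs_empty NXs_full (get_complete_hist_data DIGs NXs_empty NXs_full)

-- ===== LEMMAS AND PROOFS =====

-- A's simultaneous running-max/min pair fold splits into two independent folds.
theorem pvFoldPair (l : List (Int × Int)) : ∀ a b : Int,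
    l.foldl pvMinMaxStep (a, b)
    = (l.foldl (fun a kv => max a kv.1) a, l.foldl (fun b kv => min b kv.1) b) := by
  induction l with
  | nil => intro a b; rfl
  | cons p t ih =>
    intro a b
    simp only [List.foldl_cons]
    have hstep : pvMinMaxStep (a, b) p = (max a p.1, min b p.1) := by
      simp only [pvMinMaxStep]
      split_ifs <;> simp_all <;> omega
    rw [hstep, ih]

-- A's triple-dict fold splits componentwise.
theorem pvFoldTriple (l : List Int) (dD dE dF : PySem.Dict Int Int) :
    ∀ (a b c : PySem.Dict Int Int),
    l.foldl (pvRowStep dD dE dF) (a, b, c)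
    = (l.foldl (fun d key => d.insert key (if dD.contains key then dD.getD key 0 else 0)) a,
       l.foldl (fun d key => d.insert key (if dE.contains key then dE.getD key 0 else 0)) b,
       l.foldl (fun d key => d.insert key (if dF.contains key then dF.getD key 0 else 0)) c) := by
  induction l with
  | nil => intro a b c; rfl
  | cons x t ih => intro a b c; simp only [List.foldl_cons]; exact ih _ _ _

-- Filling distinct fresh keys into the empty dict yields exactly the mapped item list.
theorem pvFillItems (ks : List Int) (hks : ks.Nodup) (f : Int → Int) :
    (ks.foldl (fun d key => d.insert key (f key)) PySem.Dict.empty).items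
      = ks.map (fun k => (k, f k)) := by
  have h := PySem.Dict.items_foldl_insert_fresh ks (fun a => a) f PySem.Dict.empty
    (fun a _ => PySem.Dict.contains_empty a) (by simpa using hks)
  simpa using h

-- A lookup misses an assoc list none of whose keys is the looked-up key.
theorem pvGetNone (pairs : List (Int × Int)) (k : Int)
    (h : ∀ p ∈ pairs, p.1 ≠ k) : (PySem.Dict.mk pairs).get? k = none := by
  induction pairs with
  | nil => rfl
  | cons p rest ih =>
    rw [PySem.Dict.get?_mk_cons]
    rw [if_neg (by simpa using h p (List.mem_cons_self ..))]
    exact ih fun q hq => h q (List.mem_cons_of_mem _ hq)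

-- THE MERGE INVARIANT: sweeping a strictly increasing key list against a strictly
-- key-increasing pointer list whose keys all lie in the sweep appends, key by key,
-- the pointer value on a match and 0 otherwise.
theorem pvMergeFold : ∀ (ks : List Int) (pairs : List (Int × Int)) (d : PySem.Dict Int Int),
    List.Pairwise (· < ·) ks →
    List.Pairwise (fun p q => p.1 < q.1) pairs →
    (∀ p ∈ pairs, p.1 ∈ ks) →
    (∀ k ∈ ks, d.contains k = false) →
    (ks.foldl pvMergeStep (pairs, d)).2.items
      = d.items ++ ks.map (fun k => (k, (PySem.Dict.mk pairs).getD k 0)) := by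
  intro ks
  induction ks with
  | nil => intro pairs d _ _ _ _; simp
  | cons k ks' ih =>
    intro pairs d hks hpw hmem hfresh
    have hklt : ∀ k' ∈ ks', k < k' := fun k' hk' => (List.pairwise_cons.mp hks).1 k' hk'
    have hdk : d.contains k = false := hfresh k (List.mem_cons_self ..)
    have hfresh' : ∀ (v : Int), ∀ k' ∈ ks', (d.insert k v).contains k' = false := by
      intro v k' hk'
      rw [PySem.Dict.contains_eq_isSome_get?, PySem.Dict.get?_insert_of_ne _ _ (by
        exact fun h => absurd h (ne_of_gt (hklt k' hk'))),
        ← PySem.Dict.contains_eq_isSome_get?]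
      exact hfresh k' (List.mem_cons_of_mem _ hk')
    cases pairs with
    | nil =>
      simp only [List.foldl_cons, pvMergeStep]
      rw [ih [] (d.insert k 0) (List.pairwise_cons.mp hks).2 (by simp) (by simp) (hfresh' 0)]
      rw [PySem.Dict.items_insert_of_not_contains _ _ hdk]
      simp [PySem.Dict.getD_eq_get?_getD, PySem.Dict.get?_empty,
        show (PySem.Dict.mk ([] : List (Int × Int))) = PySem.Dict.empty from rfl]
    | cons p rest =>
      have hpw' : List.Pairwise (fun p q => p.1 < q.1) rest := (List.pairwise_cons.mp hpw).2
      have hplt : ∀ q ∈ rest, p.1 < q.1 := (List.pairwise_cons.mp hpw).1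
      by_cases hpk : p.1 = k
      · -- head of the pointer list matches the sweep key
        simp only [List.foldl_cons, pvMergeStep]
        rw [if_pos (show (p.1 == k) = true by simpa using hpk)]
        have hmem' : ∀ q ∈ rest, q.1 ∈ ks' := by
          intro q hq
          have hq1 : q.1 ∈ k :: ks' := hmem q (List.mem_cons_of_mem _ hq)
          have : q.1 ≠ k := by have := hplt q hq; omega
          exact (List.mem_cons.mp hq1).resolve_left this
        rw [ih rest (d.insert k p.2) (List.pairwise_cons.mp hks).2 hpw' hmem' (hfresh' p.2)]
        rw [PySem.Dict.items_insert_of_not_contains _ _ hdk, List.append_assoc]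
        congr 1
        have hhead : (PySem.Dict.mk (p :: rest)).getD k 0 = p.2 := by
          rw [PySem.Dict.getD_eq_get?_getD, PySem.Dict.get?_mk_cons,
            if_pos (by simpa using hpk)]
          rfl
        simp only [List.map_cons, hhead, List.singleton_append]
        congr 1
        refine List.map_congr_left fun k' hk' => ?_
        have hne : p.1 ≠ k' := by have := hklt k' hk'; omega
        have hx : (PySem.Dict.mk (p :: rest)).getD k' 0 = (PySem.Dict.mk rest).getD k' 0 := by
          rw [PySem.Dict.getD_eq_get?_getD, PySem.Dict.get?_mk_cons,
            if_neg (by simpa using hne), ← PySem.Dict.getD_eq_get?_getD]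
        rw [hx]
      · -- head key is strictly beyond the sweep key: emit 0, keep the pointer
        simp only [List.foldl_cons, pvMergeStep]
        rw [if_neg (show ¬ (p.1 == k) = true by simpa using hpk)]
        have hp1 : p.1 ∈ ks' := (List.mem_cons.mp (hmem p (List.mem_cons_self ..))).resolve_left hpk
        have hkp : k < p.1 := hklt _ hp1
        have hmem' : ∀ q ∈ p :: rest, q.1 ∈ ks' := by
          intro q hq
          rcases List.mem_cons.mp hq with rfl | hq'
          · exact hp1
          · have hq1 : q.1 ∈ k :: ks' := hmem q (List.mem_cons_of_mem _ hq')
            have : q.1 ≠ k := by have := hplt q hq'; omega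
            exact (List.mem_cons.mp hq1).resolve_left this
        rw [ih (p :: rest) (d.insert k 0) (List.pairwise_cons.mp hks).2 hpw hmem' (hfresh' 0)]
        rw [PySem.Dict.items_insert_of_not_contains _ _ hdk, List.append_assoc]
        congr 1
        have hnone : (PySem.Dict.mk (p :: rest)).get? k = none := by
          refine pvGetNone _ _ fun q hq => ?_
          rcases List.mem_cons.mp hq with rfl | hq'
          · omega
          · have := hplt q hq'; omega
        simp [PySem.Dict.getD_eq_get?_getD, hnone]

-- Sorting by key preserves every (seeded-default) lookup when the keys are distinct.
theorem pvGetDSorted (src : List (Int × Int)) (hnd : (src.map Prod.fst).Nodup) (k : Int) :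
    (PySem.Dict.mk (PySem.List.sorted (PySem.Dict.mk src).items (fun kv => kv.1) false)).getD k 0
      = if (PySem.Dict.mk src).contains k then (PySem.Dict.mk src).getD k 0 else 0 := by
  set sp := PySem.List.sorted (PySem.Dict.mk src).items (fun kv => kv.1) false with hsp
  have hperm : sp.Perm src := PySem.List.sorted_perm _ _ _
  have hndsp : (sp.map Prod.fst).Nodup := (hperm.map Prod.fst).nodup_iff.mpr hnd
  have hkeys_src : (PySem.Dict.mk src).keys = src.map Prod.fst := rfl
  have hkeys_sp : (PySem.Dict.mk sp).keys = sp.map Prod.fst := rfl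
  by_cases hc : (PySem.Dict.mk src).contains k
  · rw [if_pos hc]
    have hsome : ((PySem.Dict.mk src).get? k).isSome := by
      rw [← PySem.Dict.contains_eq_isSome_get?]; exact hc
    obtain ⟨v, hv⟩ := Option.isSome_iff_exists.mp hsome
    have hmemsrc : (k, v) ∈ (PySem.Dict.mk src).items := PySem.Dict.mem_items_of_get?_eq_some _ hv
    have hmemsp : (k, v) ∈ (PySem.Dict.mk sp).items := by
      show (k, v) ∈ sp
      exact hperm.mem_iff.mpr hmemsrc
    rw [PySem.Dict.getD_of_mem_items _ hmemsp (by rw [hkeys_sp]; exact hndsp)]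
    rw [PySem.Dict.getD_eq_get?_getD, hv]
    rfl
  · rw [if_neg hc]
    have hknot : k ∉ src.map Prod.fst := by
      intro hk
      rw [PySem.Dict.contains_eq_decide_mem_keys, hkeys_src] at hc
      simp [hk] at hc
    have : (PySem.Dict.mk sp).contains k = false := by
      rw [PySem.Dict.contains_eq_decide_mem_keys, hkeys_sp]
      simp only [decide_eq_false_iff_not]
      exact fun hk => hknot ((hperm.map Prod.fst).mem_iff.mp hk)
    exact PySem.Dict.getD_of_not_contains _ _ this

-- The sorted item list of a distinct-key source is strictly increasing on keys.
theorem pvSortedStrict (src : List (Int × Int)) (hnd : (src.map Prod.fst).Nodup) :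
    List.Pairwise (fun p q : Int × Int => p.1 < q.1)
      (PySem.List.sorted (PySem.Dict.mk src).items (fun kv => kv.1) false) := by
  set sp := PySem.List.sorted (PySem.Dict.mk src).items (fun kv => kv.1) false with hsp
  have hle : List.Pairwise (fun p q : Int × Int => p.1 ≤ q.1) sp :=
    PySem.List.sorted_pairwise _ _
  have hperm : sp.Perm src := PySem.List.sorted_perm _ _ _
  have hndsp : (sp.map Prod.fst).Nodup := (hperm.map Prod.fst).nodup_iff.mpr hnd
  have hne : List.Pairwise (fun p q : Int × Int => p.1 ≠ q.1) sp :=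
    (List.pairwise_map.mp hndsp)
  exact (hle.and hne).imp fun ⟨h1, h2⟩ => lt_of_le_of_ne h1 h2

theorem get_complete_hist_data_eq (DIGs NXs_empty NXs_full : List (Int × Int))
    (h1 : (DIGs.map Prod.fst).Nodup) (h2 : (NXs_empty.map Prod.fst).Nodup)
    (h3 : (NXs_full.map Prod.fst).Nodup) :
    get_complete_hist_data DIGs NXs_empty NXs_full
      = get_complete_hist_data_alt DIGs NXs_empty NXs_full := by
  unfold get_complete_hist_data get_complete_hist_data_alt
  dsimp only
  set allk := (DIGs ++ NXs_empty ++ NXs_full).map (fun p => p.1) with hallk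
  have hmm : [DIGs, NXs_empty, NXs_full].foldl (fun mm hist => hist.foldl pvMinMaxStep mm)
      ((0 : Int), (100000 : Int)) = (allk.foldl max 0, allk.foldl min 100000) := by
    simp only [List.foldl_cons, List.foldl_nil, pvFoldPair]
    rw [hallk]
    simp [List.foldl_map, List.foldl_append]
  rw [hmm, PySem.List.max?_id_cons, PySem.List.min?_id_cons]
  dsimp only [Option.getD_some]
  set M := allk.foldl max 0 with hMdef
  set m := allk.foldl min 100000 with hmdef
  set ks := PySem.List.pyRange m (M + 1) 1 with hksdef
  have hkspw : List.Pairwise (· < ·) ks := PySem.List.pairwise_lt_pyRange_one m (M + 1)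
  have hksnd : ks.Nodup := PySem.List.nodup_pyRange_one m (M + 1)
  rw [pvFoldTriple]
  have hmemks : ∀ (l : List (Int × Int)), l = DIGs ∨ l = NXs_empty ∨ l = NXs_full →
      ∀ p ∈ l, p.1 ∈ ks := by
    intro l hl p hp
    have hin : p.1 ∈ allk := by
      rw [hallk]
      refine List.mem_map.mpr ⟨p, ?_, rfl⟩
      rcases hl with rfl | rfl | rfl <;> simp [hp]
    rw [hksdef, PySem.List.mem_pyRange_one]
    refine ⟨(PySem.List.foldl_min_le allk 100000).2 _ hin, ?_⟩
    exact lt_of_le_of_lt ((PySem.List.le_foldl_max allk 0).2 _ hin) (by omega)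
  have hside : ∀ (src : List (Int × Int)), (src.map Prod.fst).Nodup →
      (∀ p ∈ src, p.1 ∈ ks) →
      (ks.foldl (fun d key => d.insert key
          (if (PySem.Dict.mk src).contains key then (PySem.Dict.mk src).getD key 0 else 0))
        PySem.Dict.empty).items = (pvDense src m M).items := by
    intro src hnd hsub
    have hsubs : ∀ p ∈ PySem.List.sorted (PySem.Dict.mk src).items (fun kv => kv.1) false,
        p.1 ∈ ks := fun p hp =>
      hsub p ((PySem.List.sorted_perm (PySem.Dict.mk src).items (fun kv => kv.1) false).mem_iff.mp hp)
    rw [pvFillItems ks hksnd, pvDense,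
      pvMergeFold ks _ PySem.Dict.empty hkspw (pvSortedStrict src hnd) hsubs
        (fun k _ => PySem.Dict.contains_empty k)]
    rw [show (PySem.Dict.empty : PySem.Dict Int Int).items = [] from rfl, List.nil_append]
    exact List.map_congr_left fun k _ => by rw [pvGetDSorted src hnd k]
  simp only [List.cons.injEq, Prod.mk.injEq, and_true, true_and]
  exact ⟨hside DIGs h1 (hmemks DIGs (Or.inl rfl)),
    hside NXs_empty h2 (hmemks NXs_empty (Or.inr (Or.inl rfl))),
    hside NXs_full h3 (hmemks NXs_full (Or.inr (Or.inr rfl)))⟩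

-- ===== VERDICT (by name: the statement is the Claim_ definition above) =====
theorem get_complete_hist_data_spec : Claim_equal_get_complete_hist_data := by
  intro DIGs NXs_empty NXs_full _ hpre
  exact get_complete_hist_data_eq DIGs NXs_empty NXs_full hpre.1 hpre.2.1 hpre.2.2
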